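-- pv_equiv track=rewrite | github.com/yasufumi-nakata/Pytra | src/common/code_emitter.py | _is_identifier_expr
-- ===== SOURCE A (Python) =====
-- def _is_identifier_expr(text: str) -> bool:
--     """式文字列が単純な識別子のみかを判定する。"""
--     if len(text) == 0:
--         return False
--     c0 = text[0:1]
--     if not (c0 == "_" or ("a" <= c0 <= "z") or ("A" <= c0 <= "Z")):
--         return False
--     i = 1
--     while i < len(text):
--         ch = text[i]
--         if not (ch == "_" or ("a" <= ch <= "z") or ("A" <= ch <= "Z") or ("0" <= ch <= "9")):
--             return False
--         i += 1
--     return True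
-- ===== SOURCE B (Python) =====
-- import re
--
-- _IDENT_RE = re.compile(r'[A-Za-z_][A-Za-z0-9_]*')
--
--
-- def _is_identifier_expr(text: str) -> bool:
--     """式文字列が単純な識別子のみかを判定する。"""
--     return _IDENT_RE.fullmatch(text) is not None
-- ===== Notes on version B (the rewrite author's own statement) =====
-- stated objective: idiomatic
-- what changed: Replaced the hand-written index/while character-class loop with a single precompiled regular expression matched with re.fullmatch against the exact ASCII pattern [A-Za-z_][A-Za-z0-9_]*.
import Mathlib
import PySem

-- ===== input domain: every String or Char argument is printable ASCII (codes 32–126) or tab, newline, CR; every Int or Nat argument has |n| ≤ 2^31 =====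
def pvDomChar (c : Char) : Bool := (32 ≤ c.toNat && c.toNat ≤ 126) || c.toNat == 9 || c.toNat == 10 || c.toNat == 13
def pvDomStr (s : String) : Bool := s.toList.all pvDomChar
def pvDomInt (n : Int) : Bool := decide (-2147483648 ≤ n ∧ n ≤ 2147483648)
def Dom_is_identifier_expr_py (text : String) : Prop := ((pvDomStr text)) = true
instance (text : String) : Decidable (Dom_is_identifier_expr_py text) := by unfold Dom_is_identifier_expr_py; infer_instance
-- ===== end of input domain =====

-- B replaces A's index-based while loop with a single re.fullmatch of the ASCII pattern [A-Za-z_][A-Za-z0-9_]* (idiomatic; same behaviour, same cost).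

-- ===== PORT A =====
-- the `while i < len(text)` loop of A, scanning the characters from index 1 on
def is_identifier_expr_py_loop (rest : List Char) : Bool :=
  match rest with
  | [] => true
  | ch :: rest' =>
      if !(ch == '_' || ('a' ≤ ch && ch ≤ 'z') || ('A' ≤ ch && ch ≤ 'Z') || ('0' ≤ ch && ch ≤ '9')) then
        false
      else
        is_identifier_expr_py_loop rest'

def is_identifier_expr_py (text : String) : Bool :=
  match text.toList with
  | [] => false                                   -- len(text) == 0
  | c0 :: rest =>                                  -- c0 = text[0:1] (one-char string compare = char compare, exact on ASCII)
      if !(c0 == '_' || ('a' ≤ c0 && c0 ≤ 'z') || ('A' ≤ c0 && c0 ≤ 'Z')) then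
        false
      else
        is_identifier_expr_py_loop rest

-- ===== PORT B =====
-- Lean has no regex engine; the compiled pattern [A-Za-z_][A-Za-z0-9_]* is ported by hand as its
-- exact matcher (exact: the pattern is one start character class followed by a starred
-- continuation class, and fullmatch anchors both ends, so it accepts exactly these strings).
def pvReClassStart (c : Char) : Bool := ('A' ≤ c && c ≤ 'Z') || ('a' ≤ c && c ≤ 'z') || c == '_'
def pvReClassCont (c : Char) : Bool := ('A' ≤ c && c ≤ 'Z') || ('a' ≤ c && c ≤ 'z') || ('0' ≤ c && c ≤ '9') || c == '_'

-- re.fullmatch of the pattern: nonempty, head in the start class, every later char in the continuation class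
def is_identifier_expr_py_alt (text : String) : Bool :=
  match text.toList with
  | [] => false
  | c :: cs => pvReClassStart c && cs.all pvReClassCont

-- ===== PRECONDITION & SPEC =====
def Spec_is_identifier_expr_py (text : String) (out : Bool) : Prop := out = is_identifier_expr_py_alt text
instance (text : String) (out : Bool) : Decidable (Spec_is_identifier_expr_py text out) := by unfold Spec_is_identifier_expr_py; infer_instance

-- ===== CLAIM (what is proved, stated in full; the proofs are below) =====
def Claim_equal_is_identifier_expr_py : Prop := ∀ (text : String), Dom_is_identifier_expr_py text → Spec_is_identifier_expr_py text (is_identifier_expr_py text)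

-- ===== LEMMAS AND PROOFS =====
lemma cont_eq (ch : Char) :
    (ch == '_' || ('a' ≤ ch && ch ≤ 'z') || ('A' ≤ ch && ch ≤ 'Z') || ('0' ≤ ch && ch ≤ '9'))
      = pvReClassCont ch := by
  simp only [pvReClassCont]
  by_cases h1 : 'a' ≤ ch <;> by_cases h2 : ch ≤ 'z' <;> by_cases h3 : 'A' ≤ ch <;>
    by_cases h4 : ch ≤ 'Z' <;> by_cases h5 : '0' ≤ ch <;> by_cases h6 : ch ≤ '9' <;>
    by_cases h0 : ch = '_' <;> simp_all <;> ac_rfl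

lemma start_eq (c : Char) :
    (c == '_' || ('a' ≤ c && c ≤ 'z') || ('A' ≤ c && c ≤ 'Z')) = pvReClassStart c := by
  simp only [pvReClassStart]
  by_cases h1 : 'a' ≤ c <;> by_cases h2 : c ≤ 'z' <;> by_cases h3 : 'A' ≤ c <;>
    by_cases h4 : c ≤ 'Z' <;> by_cases h0 : c = '_' <;> simp_all <;> ac_rfl

lemma loop_eq_all (rest : List Char) :
    is_identifier_expr_py_loop rest = rest.all pvReClassCont := by
  induction rest with
  | nil => rfl
  | cons ch rest' ih =>
      simp only [is_identifier_expr_py_loop, List.all_cons, ih]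
      rw [cont_eq ch]
      cases h : pvReClassCont ch <;> simp

-- ===== VERDICT (by name: the statement is the Claim_ definition above) =====
theorem is_identifier_expr_py_spec : Claim_equal_is_identifier_expr_py := by
  intro text _
  unfold Spec_is_identifier_expr_py
  cases h : text.toList with
  | nil => simp [is_identifier_expr_py, is_identifier_expr_py_alt, h]
  | cons c0 rest =>
      simp only [is_identifier_expr_py, is_identifier_expr_py_alt, h]
      rw [start_eq c0, loop_eq_all rest]
      cases hs : pvReClassStart c0 <;> simp
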